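-- pv_equiv track=rewrite | github.com/intrig-unicamp/macsad | src/header_info.py | field_mask
-- ===== SOURCE A (Python) =====
-- def field_mask(bitoffset, bitwidth):
--     if bitoffset+bitwidth > 32: return hex(0) # FIXME do something about this
--     pos = bitoffset;
--     mask = 0;
--     while pos < bitoffset + bitwidth:
--         mask |= (1 << pos)
--         pos += 1
--     return hex(mask)
-- ===== SOURCE B (Python) =====
-- def field_mask(bitoffset, bitwidth):
--     if bitoffset+bitwidth > 32: return hex(0) # FIXME do something about this
--     mask = ((1 << bitwidth) - 1) << bitoffset if bitwidth > 0 else 0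
--     return hex(mask)
-- ===== Notes on version B (the rewrite author's own statement) =====
-- stated objective: simpler
-- what changed: Replaced the per-bit OR-accumulation while-loop with the closed form ((1 << bitwidth) - 1) << bitoffset (0 when bitwidth <= 0).
import Mathlib
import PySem

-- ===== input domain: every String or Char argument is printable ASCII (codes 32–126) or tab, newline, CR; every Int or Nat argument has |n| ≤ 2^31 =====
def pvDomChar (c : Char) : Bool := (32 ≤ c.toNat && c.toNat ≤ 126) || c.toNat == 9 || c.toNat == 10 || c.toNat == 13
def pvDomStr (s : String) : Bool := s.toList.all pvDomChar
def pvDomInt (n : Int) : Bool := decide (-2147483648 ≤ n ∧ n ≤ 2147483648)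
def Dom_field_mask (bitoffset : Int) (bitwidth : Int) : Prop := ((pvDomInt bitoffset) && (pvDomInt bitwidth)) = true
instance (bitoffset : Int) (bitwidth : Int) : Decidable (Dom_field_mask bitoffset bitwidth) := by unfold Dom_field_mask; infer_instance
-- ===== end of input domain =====

-- B replaces A's per-bit OR-accumulation loop with the closed-form mask ((1 <<< bitwidth) - 1) <<< bitoffset (simpler).


-- ===== PORT A =====
-- Python's hex(n); exact for n ≥ 0, the only arguments either port passes it.
def pyHex (n : Int) : String := String.ofList ('0' :: 'x' :: Nat.toDigits 16 n.toNat)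

-- the while loop: `while pos < bitoffset+bitwidth: mask |= (1 << pos); pos += 1`.
-- `mask |= (1 << pos)` is `Int.lor mask (1 <<< pos.toNat)`: inside Pre_ the loop only runs with pos ≥ 0
-- (Python raises on a negative shift), where `.toNat` is exact.
-- `fuel` is the exact number of remaining iterations, (bitoffset+bitwidth - pos).toNat: the loop
-- increments pos by 1 each round and stops at pos = bitoffset+bitwidth, so this structural
-- recursion performs the very same iterations in the same order with the same state.
def fmLoop (fuel : Nat) (pos : Int) (mask : Int) : Int :=
  match fuel with
  | 0 => mask
  | f + 1 => fmLoop f (pos + 1) (Int.lor mask ((1 : Int) <<< pos.toNat))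

def field_mask (bitoffset : Int) (bitwidth : Int) : String :=
  if bitoffset + bitwidth > 32 then pyHex 0
  else pyHex (fmLoop bitwidth.toNat bitoffset 0)

-- ===== PORT B =====
def field_mask_alt (bitoffset : Int) (bitwidth : Int) : String :=
  if bitoffset + bitwidth > 32 then pyHex 0
  else pyHex (if bitwidth > 0 then ((1 : Int) <<< bitwidth.toNat - 1) <<< bitoffset.toNat else 0)

-- ===== PRECONDITION & SPEC =====
-- Pre_ excludes exactly the inputs where Python A raises ValueError (negative shift count):
-- bitwidth > 0 with bitoffset < 0 and the guard not taken.  (B raises there too.)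
def Pre_field_mask (bitoffset : Int) (bitwidth : Int) : Prop :=
  bitoffset + bitwidth > 32 ∨ bitwidth ≤ 0 ∨ 0 ≤ bitoffset
instance (bitoffset : Int) (bitwidth : Int) : Decidable (Pre_field_mask bitoffset bitwidth) := by
  unfold Pre_field_mask; infer_instance
def pvWitness_field_mask : Int × Int := (3, 5)

def Spec_field_mask (bitoffset : Int) (bitwidth : Int) (out : String) : Prop := out = field_mask_alt bitoffset bitwidth
instance (bitoffset : Int) (bitwidth : Int) (out : String) : Decidable (Spec_field_mask bitoffset bitwidth out) := by unfold Spec_field_mask; infer_instance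

-- ===== CLAIM (what is proved, stated in full; the proofs are below) =====
def Claim_equal_field_mask : Prop := ∀ (bitoffset : Int) (bitwidth : Int), Dom_field_mask bitoffset bitwidth → Pre_field_mask bitoffset bitwidth → Spec_field_mask bitoffset bitwidth (field_mask bitoffset bitwidth)

-- ===== LEMMAS AND PROOFS =====

-- On the bounded rectangle left by the guard and Pre_, the two ports agree (checked by evaluation).
theorem fm_key : ∀ a : Fin 33, ∀ b : Fin 33, field_mask a.val b.val = field_mask_alt a.val b.val := by decide

-- ===== VERDICT (by name: the statement is the Claim_ definition above) =====
theorem field_mask_spec : Claim_equal_field_mask := by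
  intro bo bw _ hpre
  unfold Spec_field_mask
  by_cases hg : bo + bw > 32
  · simp [field_mask, field_mask_alt, hg]
  · replace hg : bo + bw ≤ 32 := by omega
    by_cases hw : bw ≤ 0
    · have h1 : bw.toNat = 0 := by omega
      have h2 : ¬ bw > 0 := by omega
      rw [field_mask, field_mask_alt, if_neg (by omega), if_neg (by omega), h1, fmLoop, if_neg h2]
    · have hbo : 0 ≤ bo := by rcases hpre with h | h | h <;> omega
      have hbo' : bo < 33 := by omega
      have hbw' : bw < 33 ∧ 0 ≤ bw := by omega
      obtain ⟨a, rfl⟩ := Int.eq_ofNat_of_zero_le hbo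
      obtain ⟨b, rfl⟩ := Int.eq_ofNat_of_zero_le hbw'.2
      exact fm_key ⟨a, by omega⟩ ⟨b, by omega⟩
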